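-- pv_equiv track=rewrite | github.com/JosephTLyons/code_war_solutions | 7_kyu/ce*s*r*d_strings.py | uncensor
-- ===== SOURCE A (Python) =====
-- def uncensor(infected, discovered):
--     final_string = ""
--
--     for letter in infected:
--         if letter == "*":
--             final_string += discovered[0]
--             discovered = discovered[1:]
--         else:
--             final_string += letter
--
--     return final_string
-- ===== SOURCE B (Python) =====
-- def uncensor(infected, discovered):
--     parts = infected.split('*')
--     res = parts[0]
--     i = 0
--     for seg in parts[1:]:
--         res += discovered[i]
--         i += 1
--         res += seg
--     return res
-- ===== Notes on version B (the rewrite author's own statement) =====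
-- stated objective: faster
-- what changed: B splits the string on '*' once and interleaves the segments with successive discovered characters via an explicit index, instead of scanning character by character, branching on '*' and re-slicing discovered at every star.
import Mathlib
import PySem

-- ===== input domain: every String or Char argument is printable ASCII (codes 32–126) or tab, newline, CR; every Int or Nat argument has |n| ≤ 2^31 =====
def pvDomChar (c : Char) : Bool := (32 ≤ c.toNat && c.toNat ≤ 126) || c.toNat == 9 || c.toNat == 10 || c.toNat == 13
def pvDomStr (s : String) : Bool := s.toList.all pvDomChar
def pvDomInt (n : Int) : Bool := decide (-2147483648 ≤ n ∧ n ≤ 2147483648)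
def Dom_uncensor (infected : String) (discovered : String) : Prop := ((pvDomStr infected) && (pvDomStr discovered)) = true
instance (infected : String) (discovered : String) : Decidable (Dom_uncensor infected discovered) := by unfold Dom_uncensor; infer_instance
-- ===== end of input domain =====

-- B replaces A's per-character scan with one split on '*' and an indexed interleave; objective: simpler.

-- ===== PORT A =====
-- state = (final_string, remaining discovered); on '*' with discovered empty
-- Python raises IndexError (excluded by Pre_); the port leaves the state unchanged there.
def uncensorAstep (st : List Char × List Char) (letter : Char) : List Char × List Char :=
  if letter = '*' then
    match st.2 with
    | [] => st                               -- Python: IndexError (outside Pre_)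
    | d :: rest => (st.1 ++ [d], rest)       -- discovered[0], discovered[1:]
  else (st.1 ++ [letter], st.2)

def uncensor (infected : String) (discovered : String) : String :=
  String.ofList (infected.toList.foldl uncensorAstep ([], discovered.toList)).1

-- ===== PORT B =====
-- infected.split('*') on the character list (Python str.split with a one-char separator)
def splitStar : List Char → List (List Char)
  | [] => [[]]
  | c :: cs =>
    if c = '*' then [] :: splitStar cs
    else
      match splitStar cs with
      | [] => [[c]]            -- unreachable: splitStar never returns []
      | h :: t => (c :: h) :: t

-- loop state = (res, i); i is only ever incremented from 0, so Python's
-- discovered[i] (nonnegative index) is exactly getElem? here.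
def uncensorBstep (d : List Char) (st : List Char × Nat) (seg : List Char) : List Char × Nat :=
  match d[st.2]? with
  | some ch => (st.1 ++ [ch] ++ seg, st.2 + 1)
  | none => (st.1 ++ seg, st.2 + 1)          -- Python: IndexError (outside Pre_)

def uncensor_alt (infected : String) (discovered : String) : String :=
  String.ofList (((splitStar infected.toList).drop 1).foldl (uncensorBstep discovered.toList)
    ((splitStar infected.toList).headD [], 0)).1

-- ===== PRECONDITION & SPEC =====
-- Pre_ excludes exactly the inputs with more '*'s than discovered characters,
-- on which the Python A (and B alike) raises IndexError.
def Pre_uncensor (infected : String) (discovered : String) : Prop :=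
  infected.toList.count '*' ≤ discovered.toList.length
instance (infected : String) (discovered : String) : Decidable (Pre_uncensor infected discovered) := by
  unfold Pre_uncensor; infer_instance

def pvWitness_uncensor : String × String := ("h*ll* w*rld", "eoo")

def Spec_uncensor (infected : String) (discovered : String) (out : String) : Prop := out = uncensor_alt infected discovered
instance (infected : String) (discovered : String) (out : String) : Decidable (Spec_uncensor infected discovered out) := by unfold Spec_uncensor; infer_instance

-- ===== CLAIM (what is proved, stated in full; the proofs are below) =====
def Claim_equal_uncensor : Prop := ∀ (infected : String) (discovered : String), Dom_uncensor infected discovered → Pre_uncensor infected discovered → Spec_uncensor infected discovered (uncensor infected discovered)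

-- ===== LEMMAS AND PROOFS =====

-- closed recursive form of A's fold
def fA : List Char → List Char → List Char
  | [], _ => []
  | c :: cs, d =>
    if c = '*' then
      match d with
      | [] => fA cs []
      | x :: r => x :: fA cs r
    else c :: fA cs d

theorem foldA_eq (cs : List Char) : ∀ (fin d : List Char),
    (cs.foldl uncensorAstep (fin, d)).1 = fin ++ fA cs d := by
  induction cs with
  | nil => intro fin d; simp [fA]
  | cons c cs ih =>
    intro fin d
    by_cases hc : c = '*'
    · cases d with
      | nil => simp [List.foldl, uncensorAstep, hc, fA, ih]
      | cons x r => simp [List.foldl, uncensorAstep, hc, fA, ih]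
    · simp [List.foldl, uncensorAstep, hc, fA, ih]

-- closed recursive form of B's fold body
def gB (d : List Char) : List (List Char) → Nat → List Char
  | [], _ => []
  | seg :: ps, i =>
    match d[i]? with
    | some ch => ch :: (seg ++ gB d ps (i + 1))
    | none => seg ++ gB d ps (i + 1)

theorem foldB_eq (d : List Char) (ps : List (List Char)) : ∀ (acc : List Char) (i : Nat),
    (ps.foldl (uncensorBstep d) (acc, i)).1 = acc ++ gB d ps i := by
  induction ps with
  | nil => intro acc i; simp [gB]
  | cons seg ps ih =>
    intro acc i
    cases h : d[i]? with
    | some ch => simp [List.foldl, uncensorBstep, h, gB, ih]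
    | none => simp [List.foldl, uncensorBstep, h, gB, ih]

theorem gB_shift (d : List Char) (x : Char) (ps : List (List Char)) : ∀ (i : Nat),
    gB (x :: d) ps (i + 1) = gB d ps i := by
  induction ps with
  | nil => intro i; simp [gB]
  | cons seg ps ih => intro i; simp [gB, ih]

theorem splitStar_ne_nil (cs : List Char) : splitStar cs ≠ [] := by
  cases cs with
  | nil => simp [splitStar]
  | cons c cs =>
    simp only [splitStar]
    split
    · simp
    · split
      · simp
      · simp

-- the core equivalence on character lists
theorem main_eq (cs : List Char) : ∀ (d : List Char), cs.count '*' ≤ d.length →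
    (splitStar cs).headD [] ++ gB d ((splitStar cs).drop 1) 0 = fA cs d := by
  induction cs with
  | nil => intro d _; simp [splitStar, gB, fA]
  | cons c cs ih =>
    intro d hcount
    by_cases hc : c = '*'
    · subst hc
      have hcount' : cs.count '*' + 1 ≤ d.length := by
        simpa [List.count_cons] using hcount
      cases d with
      | nil => simp at hcount'
      | cons x r =>
        have hr : cs.count '*' ≤ r.length := by simpa using hcount'
        have hIH := ih r hr
        cases hsp : splitStar cs with
        | nil => exact absurd hsp (splitStar_ne_nil cs)
        | cons h t =>
          simp only [splitStar, if_true, List.headD, List.drop, hsp] at hIH ⊢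
          simp only [fA, gB, List.getElem?_cons_zero, gB_shift]
          rw [← hIH]
          simp
    · have hcount' : cs.count '*' ≤ d.length := by
        simp only [List.count_cons] at hcount; omega
      have hIH := ih d hcount'
      cases hsp : splitStar cs with
      | nil => exact absurd hsp (splitStar_ne_nil cs)
      | cons h t =>
        simp only [splitStar, if_neg hc, hsp] at *
        simp only [fA, if_neg hc]
        simpa using hIH

-- ===== VERDICT (by name: the statement is the Claim_ definition above) =====
theorem uncensor_spec : Claim_equal_uncensor := by
  intro infected discovered _ hpre
  unfold Spec_uncensor uncensor uncensor_alt
  rw [foldA_eq, foldB_eq]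
  simp only [List.nil_append]
  rw [main_eq infected.toList discovered.toList hpre]
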